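-- pv_equiv track=rewrite | github.com/sidou06/hackerrank-solutions | Algorithms/Implementations/Ema's Supercomputer/Solution.py | twoPluses
-- ===== SOURCE A (Python) =====
-- def twoPluses(grid):
--     # Initialize an empty list to store potential plus sizes and positions
--     li = list()
--
--     # Iterate over the entire grid to find potential pluses
--     for i in range(len(grid)):
--         for j in range(len(grid[0])):
--             if grid[i][j] == "G":  # If the current cell is "G"
--                 le = 1  # Initial size of the plus
--                 # Check the maximum size the plus can have (based on distance from the borders)
--                 for k in range(min(i, j, len(grid) - i - 1, len(grid[0]) - j - 1)):
--                     if grid[i - k - 1][j] == grid[i + k + 1][j] == grid[i][j - k - 1] == grid[i][j + k + 1] == "G":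
--                         le += 1  # Increase the size of the plus if conditions hold
--                 # Add the plus (i, j) coordinates and size to the list
--                 for x in range(1, le + 1):
--                     li.append([i, j, x])
--
--     # Sort the list of pluses by size in descending order
--     l = sorted(li, key=lambda x: x[2], reverse=True)
--
--     ma = 0  # Initialize the maximum area
--     # Iterate through all possible pairs of pluses to check if they don't overlap
--     for i in range(len(l) - 1):
--         f1 = l[i]
--         i1, j1, l1 = f1[0], f1[1], f1[2]
--
--         # If the area of the first plus is already smaller than the current max, break early
--         if (4 * (l1 - 1) + 1) ** 2 <= ma:
--             break
--
--         # Get the coordinates of the cells covered by the first plus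
--         c1 = [[i1, j1]]
--         for k in range(l1 - 1):
--             c1.append([i1 + k + 1, j1])
--             c1.append([i1 - k - 1, j1])
--             c1.append([i1, j1 + k + 1])
--             c1.append([i1, j1 - k - 1])
--
--         # Iterate through the remaining pluses to check for non-overlapping pairs
--         for j in range(i + 1, len(l)):
--             f2 = l[j]
--             i2, j2, l2 = f2[0], f2[1], f2[2]
--
--             # If the area of the product of the two pluses is smaller than the current max, break early
--             if (4 * (l1 - 1) + 1) * (4 * (l2 - 1) + 1) <= ma:
--                 break
--
--             # Get the coordinates of the cells covered by the second plus
--             c2 = [[i2, j2]]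
--             for k in range(l2 - 1):
--                 c2.append([i2 + k + 1, j2])
--                 c2.append([i2 - k - 1, j2])
--                 c2.append([i2, j2 + k + 1])
--                 c2.append([i2, j2 - k - 1])
--
--             # If the two pluses don't overlap, calculate the area and update the maximum area
--             if len([c for c in c1 if c in c2]) == 0:
--                 ma = (4 * (l1 - 1) + 1) * (4 * (l2 - 1) + 1)
--
--     # Return the maximum area found
--     return ma
-- ===== SOURCE B (Python) =====
-- def twoPluses(grid):
--     R = len(grid)
--     C = len(grid[0]) if grid else 0
--     pluses = []  # (area, bitmask of covered cells)
--     for i in range(R):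
--         for j in range(C):
--             if grid[i][j] != "G":
--                 continue
--             m = min(i, j, R - i - 1, C - j - 1)
--             le = 1 + sum(1 for k in range(m)
--                          if grid[i - k - 1][j] == "G" and grid[i + k + 1][j] == "G"
--                          and grid[i][j - k - 1] == "G" and grid[i][j + k + 1] == "G")
--             for x in range(1, le + 1):
--                 mask = 1 << (i * C + j)
--                 for d in range(1, x):
--                     mask |= (1 << ((i - d) * C + j)) | (1 << ((i + d) * C + j)) \
--                           | (1 << (i * C + (j - d))) | (1 << (i * C + (j + d)))
--                 pluses.append((4 * (x - 1) + 1, mask))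
--     best = 0
--     for a in range(len(pluses)):
--         a1, m1 = pluses[a]
--         for b in range(a + 1, len(pluses)):
--             a2, m2 = pluses[b]
--             if m1 & m2 == 0 and a1 * a2 > best:
--                 best = a1 * a2
--     return best
-- ===== Notes on version B (the rewrite author's own statement) =====
-- stated objective: alternative
-- what changed: B drops A's size-sort, early-break pruning and per-pair coordinate-list membership scans, and instead precomputes one bitmask of covered cells per plus, taking the maximum product over all pairs with a single bitwise-AND overlap test.
import Mathlib
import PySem

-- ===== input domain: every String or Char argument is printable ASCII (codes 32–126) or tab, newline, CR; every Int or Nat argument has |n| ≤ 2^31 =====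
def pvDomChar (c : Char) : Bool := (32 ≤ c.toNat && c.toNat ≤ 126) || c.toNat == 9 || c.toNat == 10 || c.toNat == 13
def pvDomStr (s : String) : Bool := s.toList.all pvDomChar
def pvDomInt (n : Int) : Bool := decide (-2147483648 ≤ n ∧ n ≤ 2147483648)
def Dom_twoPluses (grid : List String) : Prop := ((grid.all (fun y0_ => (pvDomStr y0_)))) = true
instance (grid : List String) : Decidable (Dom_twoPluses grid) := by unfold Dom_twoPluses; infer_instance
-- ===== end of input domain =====

-- B replaces A's sort + early-exit pruned pair scan with coordinate-list membership tests
-- by an unsorted pair scan over per-plus bitmasks (overlap test = bitwise AND); objective: alternative.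

-- ===== PORT A =====

-- grid[i][j] as an Option Char (shared accessor for both ports)
def pvAt (grid : List String) (i j : Int) : Option Char :=
  (PySem.List.pyGet? grid i).bind (fun r => PySem.Str.pyGet? r j)

-- the inner `for k in range(min(...)): if …: le += 1` loop of A
def pvLeA (g : List String) (i j R C : Int) : Int :=
  (PySem.List.pyRange 0 (min (min (min i j) (R - i - 1)) (C - j - 1)) 1).foldl
    (fun le k =>
      if pvAt g (i - k - 1) j == pvAt g (i + k + 1) j &&
         (pvAt g (i + k + 1) j == pvAt g i (j - k - 1) &&
          (pvAt g i (j - k - 1) == pvAt g i (j + k + 1) &&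
           pvAt g i (j + k + 1) == some 'G'))
      then le + 1 else le) 1

-- the list `li` of A: every (i, j, x) with x = 1 .. le
def pvLi (g : List String) : List (Int × Int × Int) :=
  let R : Int := g.length
  let C : Int := ((g.headD "").toList.length : Int)
  (PySem.List.pyRange 0 R 1).foldl (fun li i =>
    (PySem.List.pyRange 0 C 1).foldl (fun li j =>
      if pvAt g i j == some 'G' then
        let le := pvLeA g i j R C
        (PySem.List.pyRange 1 (le + 1) 1).foldl (fun li x => li ++ [(i, j, x)]) li
      else li) li) []

-- the cells covered by a plus centred at (i1, j1) of size l1 (A's c1 / c2 lists)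
def pvCells (i1 j1 l1 : Int) : List (Int × Int) :=
  (PySem.List.pyRange 0 (l1 - 1) 1).foldl
    (fun c k => c ++ [(i1 + k + 1, j1), (i1 - k - 1, j1), (i1, j1 + k + 1), (i1, j1 - k - 1)])
    [(i1, j1)]

-- A's inner `for j in range(i+1, len(l))` loop with its break
def pvInnerA (c1 : List (Int × Int)) (l1 : Int) : List (Int × Int × Int) → Int → Int
  | [], ma => ma
  | f2 :: rest, ma =>
    let l2 := f2.2.2
    if (4 * (l1 - 1) + 1) * (4 * (l2 - 1) + 1) ≤ ma then ma
    else
      let c2 := pvCells f2.1 f2.2.1 l2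
      let ma' := if (c1.filter (fun c => c2.contains c)).length == 0
                 then (4 * (l1 - 1) + 1) * (4 * (l2 - 1) + 1) else ma
      pvInnerA c1 l1 rest ma'

-- A's outer `for i in range(len(l) - 1)` loop with its break
def pvOuterA : List (Int × Int × Int) → Int → Int
  | [], ma => ma
  | f1 :: rest, ma =>
    let l1 := f1.2.2
    if (4 * (l1 - 1) + 1) ^ 2 ≤ ma then ma
    else pvOuterA rest (pvInnerA (pvCells f1.1 f1.2.1 l1) l1 rest ma)

def twoPluses (grid : List String) : Int :=
  pvOuterA (PySem.List.sorted (pvLi grid) (fun t => t.2.2) true) 0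

-- ===== PORT B =====

-- 1 << e  (e is nonnegative on every admitted input)
def pvBit (e : Int) : Nat := 1 <<< e.toNat

-- Source B's `for d in range(1, x)` mask accumulation for one plus
def pvMaskOf (C i j x : Int) : Nat :=
  (PySem.List.pyRange 1 x 1).foldl
    (fun mask d =>
      mask ||| (pvBit ((i - d) * C + j) ||| pvBit ((i + d) * C + j) |||
                pvBit (i * C + (j - d)) ||| pvBit (i * C + (j + d))))
    (pvBit (i * C + j))

-- Source B's plus enumeration: list of (area, bitmask)
def pvPluses (g : List String) : List (Int × Nat) :=
  let R : Int := g.length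
  let C : Int := if g.isEmpty then 0 else ((g.headD "").toList.length : Int)
  (PySem.List.pyRange 0 R 1).foldl (fun ps i =>
    (PySem.List.pyRange 0 C 1).foldl (fun ps j =>
      if pvAt g i j != some 'G' then ps
      else
        let m := min (min (min i j) (R - i - 1)) (C - j - 1)
        let le : Int := 1 +
          (((PySem.List.pyRange 0 m 1).filter (fun k =>
              pvAt g (i - k - 1) j == some 'G' && (pvAt g (i + k + 1) j == some 'G' &&
              (pvAt g i (j - k - 1) == some 'G' && pvAt g i (j + k + 1) == some 'G')))).length : Int)
        (PySem.List.pyRange 1 (le + 1) 1).foldl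
          (fun ps x => ps ++ [(4 * (x - 1) + 1, pvMaskOf C i j x)]) ps) ps) []

-- Source B's plain double loop over pairs, best-so-far accumulator
def pvBestB : List (Int × Nat) → Int → Int
  | [], best => best
  | (a1, m1) :: rest, best =>
    pvBestB rest
      (rest.foldl (fun best p =>
        if (m1 &&& p.2) == 0 && a1 * p.1 > best then a1 * p.1 else best) best)

def twoPluses_alt (grid : List String) : Int :=
  pvBestB (pvPluses grid) 0

-- ===== PRECONDITION & SPEC =====
-- Pre_ excludes exactly the grids with a row shorter than row 0, on which the Python A
-- (and B) raises IndexError; on every other grid A returns normally.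
def Pre_twoPluses (grid : List String) : Prop :=
  ∀ r ∈ grid, (grid.headD "").toList.length ≤ r.toList.length
instance (grid : List String) : Decidable (Pre_twoPluses grid) := by
  unfold Pre_twoPluses; infer_instance
def pvWitness_twoPluses : List String := ["GBG", "GGG", "BGG"]

def Spec_twoPluses (grid : List String) (out : Int) : Prop := out = twoPluses_alt grid
instance (grid : List String) (out : Int) : Decidable (Spec_twoPluses grid out) := by unfold Spec_twoPluses; infer_instance

-- ===== CLAIM (what is proved, stated in full; the proofs are below) =====
def Claim_equal_twoPluses : Prop := ∀ (grid : List String), Dom_twoPluses grid → Pre_twoPluses grid → Spec_twoPluses grid (twoPluses grid)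

-- ===== LEMMAS AND PROOFS =====

-- ---- generic max-of-values machinery ----

def pvArea (x : Int) : Int := 4 * (x - 1) + 1

def pvEnc (C : Int) (c : Int × Int) : Int := c.1 * C + c.2

def pvF (C : Int) (t : Int × Int × Int) : Int × Nat :=
  (pvArea t.2.2, pvMaskOf C t.1 t.2.1 t.2.2)

-- max of v over a list (0 if empty)
def pvIM {α : Type} (v : α → Int) : List α → Int
  | [] => 0
  | q :: l => max (v q) (pvIM v l)

-- max of v over ordered pairs of a list (0 if none)
def pvPM {α : Type} (v : α → α → Int) : List α → Int
  | [] => 0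
  | p :: l => max (pvIM (v p) l) (pvPM v l)

-- pair value on A's side
def pvVA (p q : Int × Int × Int) : Int :=
  if ((pvCells p.1 p.2.1 p.2.2).filter
        (fun c => (pvCells q.1 q.2.1 q.2.2).contains c)).length == 0
  then pvArea p.2.2 * pvArea q.2.2 else 0

-- pair value on B's side
def pvVB (p q : Int × Nat) : Int := if (p.2 &&& q.2) == 0 then p.1 * q.1 else 0

-- the shape invariant of every triple in li
def pvGood (R C : Int) (t : Int × Int × Int) : Prop :=
  0 ≤ t.1 ∧ t.1 < R ∧ 0 ≤ t.2.1 ∧ t.2.1 < C ∧ 1 ≤ t.2.2 ∧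
  t.2.2 - 1 ≤ t.1 ∧ t.2.2 - 1 ≤ t.2.1 ∧ t.2.2 - 1 ≤ R - t.1 - 1 ∧ t.2.2 - 1 ≤ C - t.2.1 - 1

theorem pvIM_le {α : Type} {v : α → Int} {l : List α} {b : Int}
    (h : ∀ q ∈ l, v q ≤ b) (hb : 0 ≤ b) : pvIM v l ≤ b := by
  induction l with
  | nil => simpa [pvIM]
  | cons q l ih =>
    have h1 := h q (by simp)
    have h2 := ih (fun q hq => h q (by simp [hq]))
    simp only [pvIM]; omega

theorem pvPM_le {α : Type} {v : α → α → Int} {l : List α} {b : Int}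
    (h : ∀ p ∈ l, ∀ q ∈ l, v p q ≤ b) (hb : 0 ≤ b) : pvPM v l ≤ b := by
  induction l with
  | nil => simpa [pvPM]
  | cons p l ih =>
    have h1 : pvIM (v p) l ≤ b :=
      pvIM_le (fun q hq => h p (by simp) q (by simp [hq])) hb
    have h2 := ih (fun a ha q hq => h a (by simp [ha]) q (by simp [hq]))
    simp only [pvPM]; omega

theorem pvIM_perm {α : Type} (v : α → Int) {l l' : List α} (h : l.Perm l') :
    pvIM v l = pvIM v l' := by
  induction h with
  | nil => rfl
  | cons x h ih => simp only [pvIM, ih]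
  | swap x y l => simp only [pvIM]; omega
  | trans h1 h2 ih1 ih2 => omega

theorem pvPM_perm {α : Type} (v : α → α → Int) (hs : ∀ p q, v p q = v q p)
    {l l' : List α} (h : l.Perm l') : pvPM v l = pvPM v l' := by
  induction h with
  | nil => rfl
  | cons x h ih => simp only [pvPM, ih, pvIM_perm (v x) h]
  | swap x y l => simp only [pvPM, pvIM, hs x y]; omega
  | trans h1 h2 ih1 ih2 => omega

theorem pvIM_map_congr {α β : Type} {v : α → Int} {w : β → Int} {f : α → β} {l : List α}
    (h : ∀ q ∈ l, v q = w (f q)) : pvIM v l = pvIM w (l.map f) := by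
  induction l with
  | nil => rfl
  | cons q l ih =>
    simp only [List.map, pvIM, h q (by simp), ih (fun q hq => h q (by simp [hq]))]

theorem pvPM_map_congr {α β : Type} {v : α → α → Int} {w : β → β → Int} {f : α → β}
    {l : List α} (h : ∀ p ∈ l, ∀ q ∈ l, v p q = w (f p) (f q)) :
    pvPM v l = pvPM w (l.map f) := by
  induction l with
  | nil => rfl
  | cons p l ih =>
    simp only [List.map, pvPM]
    rw [pvIM_map_congr (fun q hq => h p (by simp) q (by simp [hq])),
        ih (fun a ha q hq => h a (by simp [ha]) q (by simp [hq]))]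

-- ---- B's pair loop computes pvPM pvVB ----

theorem pvBestB_inner (a1 : Int) (m1 : Nat) (l : List (Int × Nat)) :
    ∀ best : Int, 0 ≤ best →
      l.foldl (fun best p =>
        if (m1 &&& p.2) == 0 && a1 * p.1 > best then a1 * p.1 else best) best
      = max best (pvIM (pvVB (a1, m1)) l) := by
  induction l with
  | nil => intro best hb; simp [pvIM]; omega
  | cons q l ih =>
    intro best hb
    have hstep : (if (m1 &&& q.2) == 0 && a1 * q.1 > best then a1 * q.1 else best)
        = max best (pvVB (a1, m1) q) := by
      simp only [pvVB]
      by_cases hd : (m1 &&& q.2) == 0 <;> simp [hd] <;> omega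
    simp only [List.foldl, hstep]
    rw [ih _ (by omega)]
    simp only [pvIM]; omega

theorem pvBestB_eq (l : List (Int × Nat)) :
    ∀ best : Int, 0 ≤ best → pvBestB l best = max best (pvPM pvVB l) := by
  induction l with
  | nil => intro best hb; simp [pvBestB, pvPM]; omega
  | cons q l ih =>
    intro best hb
    obtain ⟨a1, m1⟩ := q
    simp only [pvBestB]
    rw [pvBestB_inner a1 m1 l best hb, ih _ (by omega)]
    simp only [pvPM]; omega

-- ---- A's pruned pair loops compute pvPM pvVA on a size-sorted list ----

theorem pvArea_pos {x : Int} (h : 1 ≤ x) : 0 < pvArea x := by unfold pvArea; omega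

theorem pvVA_le_of_le {p q : Int × Int × Int} {b : Int} (hp : 1 ≤ p.2.2)
    (hb : 0 ≤ b) (hle : pvArea p.2.2 * pvArea q.2.2 ≤ b) : pvVA p q ≤ b := by
  unfold pvVA; split
  · exact hle
  · exact hb

theorem pvInnerA_eq (p : Int × Int × Int) (hp : 1 ≤ p.2.2) :
    ∀ (l : List (Int × Int × Int)) (ma : Int), 0 ≤ ma →
      l.Pairwise (fun a b => b.2.2 ≤ a.2.2) →
      pvInnerA (pvCells p.1 p.2.1 p.2.2) p.2.2 l ma = max ma (pvIM (pvVA p) l) := by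
  intro l
  induction l with
  | nil => intro ma hma _; simp [pvInnerA, pvIM]; omega
  | cons q l ih =>
    intro ma hma hpw
    have hpw' := (List.pairwise_cons.mp hpw).2
    have hhead := (List.pairwise_cons.mp hpw).1
    by_cases hbr : (4 * (p.2.2 - 1) + 1) * (4 * (q.2.2 - 1) + 1) ≤ ma
    · -- break: everything later is below ma already
      have hA : ∀ r ∈ q :: l, pvVA p r ≤ ma := by
        intro r hr
        have hr2 : r.2.2 ≤ q.2.2 := by
          rcases hr with _ | hr
          · exact le_refl _
          · exact hhead r (by assumption)
        refine pvVA_le_of_le hp hma ?_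
        have h1 : pvArea r.2.2 ≤ pvArea q.2.2 := by unfold pvArea; omega
        have h2 : 0 ≤ pvArea p.2.2 := le_of_lt (pvArea_pos hp)
        calc pvArea p.2.2 * pvArea r.2.2 ≤ pvArea p.2.2 * pvArea q.2.2 :=
              mul_le_mul_of_nonneg_left h1 h2
          _ ≤ ma := by unfold pvArea; exact hbr
      have : pvIM (pvVA p) (q :: l) ≤ ma := pvIM_le hA hma
      simp only [pvInnerA, if_pos hbr]
      omega
    · have hbr' : ¬ ((4 * (p.2.2 - 1) + 1) * (4 * (q.2.2 - 1) + 1) ≤ ma) := hbr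
      simp only [pvInnerA, if_neg hbr']
      have hma' : (if ((pvCells p.1 p.2.1 p.2.2).filter
            (fun c => (pvCells q.1 q.2.1 q.2.2).contains c)).length == 0
          then (4 * (p.2.2 - 1) + 1) * (4 * (q.2.2 - 1) + 1) else ma)
          = max ma (pvVA p q) := by
        unfold pvVA pvArea
        split
        · omega
        · omega
      rw [hma', ih _ (by omega) hpw']
      simp only [pvIM]; omega

theorem pvOuterA_eq :
    ∀ (l : List (Int × Int × Int)) (ma : Int), 0 ≤ ma →
      l.Pairwise (fun a b => b.2.2 ≤ a.2.2) → (∀ t ∈ l, 1 ≤ t.2.2) →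
      pvOuterA l ma = max ma (pvPM pvVA l) := by
  intro l
  induction l with
  | nil => intro ma hma _ _; simp [pvOuterA, pvPM]; omega
  | cons p l ih =>
    intro ma hma hpw hsz
    have hp : 1 ≤ p.2.2 := hsz p (by simp)
    have hpw' := (List.pairwise_cons.mp hpw).2
    have hhead := (List.pairwise_cons.mp hpw).1
    by_cases hbr : (4 * (p.2.2 - 1) + 1) ^ 2 ≤ ma
    · have hsq : pvArea p.2.2 * pvArea p.2.2 ≤ ma := by
        unfold pvArea; nlinarith [hbr]
      have hIM : pvIM (pvVA p) l ≤ ma := by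
        refine pvIM_le (fun q hq => ?_) hma
        refine pvVA_le_of_le hp hma ?_
        have h1 : pvArea q.2.2 ≤ pvArea p.2.2 := by unfold pvArea; have := hhead q hq; omega
        have h2 : 0 ≤ pvArea p.2.2 := le_of_lt (pvArea_pos hp)
        calc pvArea p.2.2 * pvArea q.2.2 ≤ pvArea p.2.2 * pvArea p.2.2 :=
              mul_le_mul_of_nonneg_left h1 h2
          _ ≤ ma := hsq
      have hPM : pvPM pvVA l ≤ ma := by
        refine pvPM_le (fun a ha q hq => ?_) hma
        have ha1 : 1 ≤ a.2.2 := hsz a (by simp [ha])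
        refine pvVA_le_of_le ha1 hma ?_
        have h1 : pvArea a.2.2 ≤ pvArea p.2.2 := by unfold pvArea; have := hhead a ha; omega
        have h2 : pvArea q.2.2 ≤ pvArea p.2.2 := by unfold pvArea; have := hhead q hq; omega
        have h3 : 0 ≤ pvArea a.2.2 := le_of_lt (pvArea_pos ha1)
        have h4 : 0 ≤ pvArea p.2.2 := le_of_lt (pvArea_pos hp)
        calc pvArea a.2.2 * pvArea q.2.2 ≤ pvArea a.2.2 * pvArea p.2.2 :=
              mul_le_mul_of_nonneg_left h2 h3
          _ ≤ pvArea p.2.2 * pvArea p.2.2 := mul_le_mul_of_nonneg_right h1 h4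
          _ ≤ ma := hsq
      simp only [pvOuterA, if_pos hbr, pvPM]
      omega
    · simp only [pvOuterA, if_neg hbr]
      rw [pvInnerA_eq p hp l ma hma hpw']
      rw [ih _ (by omega) hpw' (fun t ht => hsz t (by simp [ht]))]
      simp only [pvPM]; omega

-- ---- structure of li / pluses ----

theorem pvChain_eq (a b c d : Option Char) :
    (a == b && (b == c && (c == d && d == some 'G')))
      = (a == some 'G' && (b == some 'G' && (c == some 'G' && d == some 'G'))) := by
  rw [Bool.eq_iff_iff]
  simp only [Bool.and_eq_true, beq_iff_eq]
  constructor <;> rintro ⟨h1, h2, h3, h4⟩ <;> simp_all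

def pvCond (g : List String) (i j k : Int) : Bool :=
  pvAt g (i - k - 1) j == some 'G' && (pvAt g (i + k + 1) j == some 'G' &&
  (pvAt g i (j - k - 1) == some 'G' && pvAt g i (j + k + 1) == some 'G'))

theorem pvLeA_eq_countP (g : List String) (i j R C : Int) :
    pvLeA g i j R C =
      1 + ((PySem.List.pyRange 0 (min (min (min i j) (R - i - 1)) (C - j - 1)) 1).countP
            (pvCond g i j) : Int) := by
  unfold pvLeA
  rw [PySem.List.foldl_if_add_one]
  congr 2
  refine List.countP_congr (fun k _ => ?_)
  rw [pvChain_eq]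
  rfl

def pvEnum (g : List String) (R C : Int) (f : Int × Int × Int → α) : List α :=
  (PySem.List.pyRange 0 R 1).flatMap (fun i =>
    (PySem.List.pyRange 0 C 1).flatMap (fun j =>
      if pvAt g i j == some 'G' then
        (PySem.List.pyRange 1 (pvLeA g i j R C + 1) 1).map (fun x => f (i, j, x))
      else []))

theorem pvLi_eq_enum (g : List String) :
    pvLi g = pvEnum g (g.length : Int) ((g.headD "").toList.length : Int) id := by
  show (List.foldl (fun li i =>
      List.foldl (fun li j =>
        if (pvAt g i j == some 'G') = true then
          List.foldl (fun li x => li ++ [(i, j, x)]) li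
            (PySem.List.pyRange 1
              (pvLeA g i j (g.length : Int) ((g.headD "").toList.length : Int) + 1) 1)
        else li) li (PySem.List.pyRange 0 ((g.headD "").toList.length : Int) 1))
      [] (PySem.List.pyRange 0 (g.length : Int) 1)) = _
  set R : Int := (g.length : Int) with hR
  set C : Int := ((g.headD "").toList.length : Int) with hC
  have hj : ∀ (i : Int) (li : List (Int × Int × Int)),
      List.foldl (fun li j =>
        if (pvAt g i j == some 'G') = true then
          List.foldl (fun li x => li ++ [(i, j, x)]) li
            (PySem.List.pyRange 1 (pvLeA g i j R C + 1) 1)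
        else li) li (PySem.List.pyRange 0 C 1)
      = li ++ (PySem.List.pyRange 0 C 1).flatMap (fun j =>
          if pvAt g i j == some 'G' then
            (PySem.List.pyRange 1 (pvLeA g i j R C + 1) 1).map (fun x => (i, j, x))
          else []) := by
    intro i li
    rw [PySem.List.foldl_congr_mem _ _
      (fun li j => li ++ (if pvAt g i j == some 'G' then
        (PySem.List.pyRange 1 (pvLeA g i j R C + 1) 1).map (fun x => (i, j, x))
        else [])) _ ?_]
    · exact PySem.List.foldl_append_eq_flatMap _ _ _
    · intro acc j _
      by_cases hG : pvAt g i j == some 'G'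
      · simp only [if_pos hG]
        exact PySem.List.foldl_append_singleton_eq_map _ _ _
      · simp only [if_neg hG, List.append_nil]
  rw [PySem.List.foldl_congr_mem _ _
    (fun li i => li ++ (PySem.List.pyRange 0 C 1).flatMap (fun j =>
      if pvAt g i j == some 'G' then
        (PySem.List.pyRange 1 (pvLeA g i j R C + 1) 1).map (fun x => (i, j, x))
      else [])) _ (fun acc i _ => hj i acc)]
  rw [PySem.List.foldl_append_eq_flatMap]
  simp only [pvEnum, id_eq, List.nil_append]

theorem pvPluses_eq_enum (g : List String) :
    pvPluses g = pvEnum g (g.length : Int) ((g.headD "").toList.length : Int)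
      (pvF ((g.headD "").toList.length : Int)) := by
  have hCif : (if g.isEmpty = true then (0 : Int) else ((g.headD "").toList.length : Int))
      = ((g.headD "").toList.length : Int) := by cases g <;> simp
  show (List.foldl (fun ps i =>
      List.foldl (fun ps j =>
        if (pvAt g i j != some 'G') = true then ps
        else
          List.foldl (fun ps x => ps ++
              [(4 * (x - 1) + 1, pvMaskOf
                (if g.isEmpty = true then (0 : Int) else ((g.headD "").toList.length : Int))
                i j x)]) ps
            (PySem.List.pyRange 1 ((1 +
              ((List.filter (fun k =>
                  pvAt g (i - k - 1) j == some 'G' &&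
                    (pvAt g (i + k + 1) j == some 'G' &&
                      (pvAt g i (j - k - 1) == some 'G' && pvAt g i (j + k + 1) == some 'G')))
                (PySem.List.pyRange 0 (min (min (min i j) ((g.length : Int) - i - 1))
                  ((if g.isEmpty = true then (0 : Int) else ((g.headD "").toList.length : Int))
                    - j - 1)) 1)).length : Int)) + 1) 1))
        ps (PySem.List.pyRange 0
          (if g.isEmpty = true then (0 : Int) else ((g.headD "").toList.length : Int)) 1))
      [] (PySem.List.pyRange 0 (g.length : Int) 1)) = _
  rw [hCif]
  set R : Int := (g.length : Int) with hR
  set C : Int := ((g.headD "").toList.length : Int) with hC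
  have hj : ∀ (i : Int) (ps : List (Int × Nat)),
      List.foldl (fun ps j =>
        if (pvAt g i j != some 'G') = true then ps
        else
          List.foldl (fun ps x => ps ++ [(4 * (x - 1) + 1, pvMaskOf C i j x)]) ps
            (PySem.List.pyRange 1 ((1 +
              ((List.filter (fun k =>
                  pvAt g (i - k - 1) j == some 'G' &&
                    (pvAt g (i + k + 1) j == some 'G' &&
                      (pvAt g i (j - k - 1) == some 'G' && pvAt g i (j + k + 1) == some 'G')))
                (PySem.List.pyRange 0 (min (min (min i j) (R - i - 1)) (C - j - 1)) 1)).length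
                : Int)) + 1) 1)) ps (PySem.List.pyRange 0 C 1)
      = ps ++ (PySem.List.pyRange 0 C 1).flatMap (fun j =>
          if pvAt g i j == some 'G' then
            (PySem.List.pyRange 1 (pvLeA g i j R C + 1) 1).map (fun x => pvF C (i, j, x))
          else []) := by
    intro i ps
    rw [PySem.List.foldl_congr_mem _ _
      (fun ps j => ps ++ (if pvAt g i j == some 'G' then
        (PySem.List.pyRange 1 (pvLeA g i j R C + 1) 1).map (fun x => pvF C (i, j, x))
        else [])) _ ?_]
    · exact PySem.List.foldl_append_eq_flatMap _ _ _
    · intro acc j _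
      have hle : (1 : Int) +
          ((List.filter (fun k =>
              pvAt g (i - k - 1) j == some 'G' &&
                (pvAt g (i + k + 1) j == some 'G' &&
                  (pvAt g i (j - k - 1) == some 'G' && pvAt g i (j + k + 1) == some 'G')))
            (PySem.List.pyRange 0 (min (min (min i j) (R - i - 1)) (C - j - 1)) 1)).length
            : Int) = pvLeA g i j R C := by
        rw [pvLeA_eq_countP, List.countP_eq_length_filter]
        rfl
      by_cases hG : pvAt g i j == some 'G'
      · rw [hle]
        simp only [bne, hG, Bool.not_true, Bool.false_eq_true, if_false, if_pos hG]
        exact PySem.List.foldl_append_singleton_eq_map (fun x => pvF C (i, j, x)) _ _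
      · simp [bne, hG]
  rw [PySem.List.foldl_congr_mem _ _
    (fun ps i => ps ++ (PySem.List.pyRange 0 C 1).flatMap (fun j =>
      if pvAt g i j == some 'G' then
        (PySem.List.pyRange 1 (pvLeA g i j R C + 1) 1).map (fun x => pvF C (i, j, x))
      else [])) _ (fun acc i _ => hj i acc)]
  rw [PySem.List.foldl_append_eq_flatMap]
  simp only [pvEnum, List.nil_append]

theorem pvPluses_eq_map (g : List String) :
    pvPluses g = (pvLi g).map (pvF ((g.headD "").toList.length : Int)) := by
  rw [pvLi_eq_enum, pvPluses_eq_enum]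
  simp only [pvEnum, List.map_flatMap]
  refine List.flatMap_congr (fun i hi => List.flatMap_congr (fun j hj => ?_))
  split
  · simp [List.map_map, Function.comp_def]
  · simp

theorem pvLi_good (g : List String) :
    ∀ t ∈ pvLi g, pvGood (g.length : Int) ((g.headD "").toList.length : Int) t := by
  intro t ht
  rw [pvLi_eq_enum] at ht
  set R : Int := (g.length : Int) with hR
  set C : Int := ((g.headD "").toList.length : Int) with hC
  simp only [pvEnum, List.mem_flatMap, PySem.List.mem_pyRange_one, id_eq] at ht
  obtain ⟨i, ⟨hi0, hiR⟩, j, ⟨hj0, hjC⟩, ht⟩ := ht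
  by_cases hG : pvAt g i j == some 'G'
  · simp only [if_pos hG, List.mem_map, PySem.List.mem_pyRange_one] at ht
    obtain ⟨x, ⟨hx1, hxle⟩, rfl⟩ := ht
    have hle : pvLeA g i j R C ≤ min (min (min i j) (R - i - 1)) (C - j - 1) + 1 := by
      rw [pvLeA_eq_countP]
      have hcp := List.countP_le_length (p := pvCond g i j)
        (l := PySem.List.pyRange 0 (min (min (min i j) (R - i - 1)) (C - j - 1)) 1)
      have hlen := PySem.List.length_pyRange_one 0
        (min (min (min i j) (R - i - 1)) (C - j - 1))
      omega
    simp only [pvGood]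
    omega
  · simp only [if_neg hG, List.not_mem_nil] at ht

-- ---- cells / masks ----

theorem pvCells_eq_flat (i j x : Int) :
    pvCells i j x = (i, j) :: (PySem.List.pyRange 0 (x - 1) 1).flatMap
      (fun k => [(i + k + 1, j), (i - k - 1, j), (i, j + k + 1), (i, j - k - 1)]) := by
  unfold pvCells
  rw [PySem.List.foldl_append_eq_flatMap
    (fun k => [(i + k + 1, j), (i - k - 1, j), (i, j + k + 1), (i, j - k - 1)])]
  rfl

theorem mem_pvCells {i j x : Int} {c : Int × Int} :
    c ∈ pvCells i j x ↔ c = (i, j) ∨ ∃ d : Int, 1 ≤ d ∧ d ≤ x - 1 ∧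
      (c = (i - d, j) ∨ c = (i + d, j) ∨ c = (i, j - d) ∨ c = (i, j + d)) := by
  rw [pvCells_eq_flat]
  simp only [List.mem_cons, List.mem_flatMap, PySem.List.mem_pyRange_one]
  obtain ⟨c1, c2⟩ := c
  constructor
  · rintro (h | ⟨k, ⟨hk0, hkx⟩, hc⟩)
    · exact Or.inl h
    · simp only [List.not_mem_nil, or_false, List.mem_cons, Prod.mk.injEq] at hc
      refine Or.inr ⟨k + 1, by omega, by omega, ?_⟩
      simp only [Prod.mk.injEq]
      omega
  · rintro (h | ⟨d, hd1, hdx, hc⟩)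
    · exact Or.inl h
    · refine Or.inr ⟨d - 1, ⟨by omega, by omega⟩, ?_⟩
      simp only [List.mem_cons, List.not_mem_nil, or_false, Prod.mk.injEq] at hc ⊢
      omega

theorem pvCells_inbounds {R C : Int} {t : Int × Int × Int} (hg : pvGood R C t)
    {c : Int × Int} (hc : c ∈ pvCells t.1 t.2.1 t.2.2) :
    0 ≤ c.1 ∧ c.1 < R ∧ 0 ≤ c.2 ∧ c.2 < C := by
  obtain ⟨h1, h2, h3, h4, h5, h6, h7, h8, h9⟩ := hg
  obtain ⟨c1, c2⟩ := c
  rcases mem_pvCells.mp hc with h | ⟨d, hd1, hdx, h⟩ <;>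
    simp only [Prod.mk.injEq] at h <;> simp only [] <;> omega

theorem pvTestBit_foldl_or {α : Type} (g : α → Nat) (l : List α) :
    ∀ (m0 : Nat) (b : Nat),
      (l.foldl (fun m e => m ||| g e) m0).testBit b
        = (m0.testBit b || l.any (fun e => (g e).testBit b)) := by
  induction l with
  | nil => intro m0 b; simp
  | cons e l ih =>
    intro m0 b
    simp only [List.foldl, List.any_cons]
    rw [ih]
    simp [Nat.testBit_or, Bool.or_assoc]

theorem pvTestBit_pvBit (e : Int) (b : Nat) :
    (pvBit e).testBit b = decide (e.toNat = b) := by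
  unfold pvBit
  rw [Nat.one_shiftLeft, Nat.testBit_two_pow]

theorem testBit_pvMaskOf {C i j x : Int} {b : Nat} :
    (pvMaskOf C i j x).testBit b = true ↔
      ∃ c ∈ pvCells i j x, (pvEnc C c).toNat = b := by
  unfold pvMaskOf
  rw [pvTestBit_foldl_or]
  simp only [Bool.or_eq_true, List.any_eq_true, PySem.List.mem_pyRange_one,
    Nat.testBit_or, pvTestBit_pvBit, decide_eq_true_eq]
  constructor
  · rintro (h | ⟨d, ⟨hd1, hdx⟩, h⟩)
    · exact ⟨(i, j), mem_pvCells.mpr (Or.inl rfl), h⟩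
    · rcases h with ((h | h) | h) | h
      · exact ⟨(i - d, j), mem_pvCells.mpr (Or.inr ⟨d, hd1, by omega, Or.inl rfl⟩), h⟩
      · exact ⟨(i + d, j),
          mem_pvCells.mpr (Or.inr ⟨d, hd1, by omega, Or.inr (Or.inl rfl)⟩), h⟩
      · exact ⟨(i, j - d),
          mem_pvCells.mpr (Or.inr ⟨d, hd1, by omega, Or.inr (Or.inr (Or.inl rfl))⟩), h⟩
      · exact ⟨(i, j + d),
          mem_pvCells.mpr (Or.inr ⟨d, hd1, by omega, Or.inr (Or.inr (Or.inr rfl))⟩), h⟩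
  · rintro ⟨c, hc, hb⟩
    rcases mem_pvCells.mp hc with h | ⟨d, hd1, hdx, h⟩
    · subst h; exact Or.inl hb
    · refine Or.inr ⟨d, ⟨hd1, by omega⟩, ?_⟩
      rcases h with h | h | h | h <;> subst h <;> subst hb <;> simp [pvEnc]

theorem pvEnc_inj {C : Int} {c c' : Int × Int}
    (h1 : 0 ≤ c.1) (h2 : 0 ≤ c.2) (h3 : c.2 < C)
    (h4 : 0 ≤ c'.1) (h5 : 0 ≤ c'.2) (h6 : c'.2 < C)
    (he : pvEnc C c = pvEnc C c') : c = c' := by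
  unfold pvEnc at he
  have hC : C ≠ 0 := by omega
  have hdiv : (c.2 + c.1 * C) / C = (c'.2 + c'.1 * C) / C := by
    rw [show c.2 + c.1 * C = c.1 * C + c.2 by ring,
        show c'.2 + c'.1 * C = c'.1 * C + c'.2 by ring, he]
  rw [Int.add_mul_ediv_right _ _ hC, Int.add_mul_ediv_right _ _ hC,
      Int.ediv_eq_zero_of_lt h2 h3, Int.ediv_eq_zero_of_lt h5 h6] at hdiv
  have hc1 : c.1 = c'.1 := by omega
  have hc2 : c.2 = c'.2 := by
    have := he
    rw [hc1] at this
    omega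
  exact Prod.ext hc1 hc2

theorem pvLand_eq_zero_iff {m n : Nat} :
    m &&& n = 0 ↔ ∀ b, ¬ (m.testBit b = true ∧ n.testBit b = true) := by
  constructor
  · intro h b ⟨h1, h2⟩
    have : (m &&& n).testBit b = true := by rw [Nat.testBit_and, h1, h2]; rfl
    rw [h] at this
    simp [Nat.zero_testBit] at this
  · intro h
    refine Nat.eq_of_testBit_eq (fun b => ?_)
    rw [Nat.testBit_and, Nat.zero_testBit]
    have := h b
    rcases hm : m.testBit b <;> rcases hn : n.testBit b <;> simp_all

theorem pvDisj_eq {R C : Int} {p q : Int × Int × Int}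
    (hp : pvGood R C p) (hq : pvGood R C q) :
    (((pvCells p.1 p.2.1 p.2.2).filter
        (fun c => (pvCells q.1 q.2.1 q.2.2).contains c)).length == 0)
      = ((pvMaskOf C p.1 p.2.1 p.2.2 &&& pvMaskOf C q.1 q.2.1 q.2.2) == 0) := by
  rw [Bool.eq_iff_iff, beq_iff_eq, beq_iff_eq, List.length_eq_zero_iff,
    List.filter_eq_nil_iff, pvLand_eq_zero_iff]
  simp only [List.contains_eq_mem, decide_eq_true_eq]
  constructor
  · rintro h b ⟨h1, h2⟩
    obtain ⟨c, hc, hbc⟩ := testBit_pvMaskOf.mp h1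
    obtain ⟨c', hc', hbc'⟩ := testBit_pvMaskOf.mp h2
    have hcb := pvCells_inbounds hp hc
    have hcb' := pvCells_inbounds hq hc'
    have hm1 : 0 ≤ c.1 * C := mul_nonneg hcb.1 (by omega)
    have hm2 : 0 ≤ c'.1 * C := mul_nonneg hcb'.1 (by omega)
    have he1 : 0 ≤ pvEnc C c := by unfold pvEnc; omega
    have he2 : 0 ≤ pvEnc C c' := by unfold pvEnc; omega
    have henc : pvEnc C c = pvEnc C c' := by omega
    have hcc : c = c' :=
      pvEnc_inj hcb.1 hcb.2.2.1 hcb.2.2.2 hcb'.1 hcb'.2.2.1 hcb'.2.2.2 henc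
    exact h c hc (hcc ▸ hc')
  · intro h c hc hc'
    exact absurd ⟨testBit_pvMaskOf.mpr ⟨c, hc, rfl⟩, testBit_pvMaskOf.mpr ⟨c, hc', rfl⟩⟩
      (h ((pvEnc C c).toNat) |> fun hh => hh)
theorem pvVA_eq_pvVB {R C : Int} {p q : Int × Int × Int}
    (hp : pvGood R C p) (hq : pvGood R C q) :
    pvVA p q = pvVB (pvF C p) (pvF C q) := by
  unfold pvVA pvVB pvF
  simp only
  rw [pvDisj_eq hp hq]

theorem pvVA_symm (p q : Int × Int × Int) : pvVA p q = pvVA q p := by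
  have hiff : ∀ (A B : List (Int × Int)),
      (((A.filter (fun c => B.contains c)).length == 0) = true ↔ ∀ c ∈ A, c ∉ B) := by
    intro A B
    simp [List.length_eq_zero_iff, List.filter_eq_nil_iff, List.contains_eq_mem]
  unfold pvVA
  have hcond : (((pvCells p.1 p.2.1 p.2.2).filter
        (fun c => (pvCells q.1 q.2.1 q.2.2).contains c)).length == 0)
      = (((pvCells q.1 q.2.1 q.2.2).filter
        (fun c => (pvCells p.1 p.2.1 p.2.2).contains c)).length == 0) := by
    rw [Bool.eq_iff_iff, hiff, hiff]
    constructor <;> exact fun h c hc hc' => h c hc' hc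
  rw [hcond]
  split
  · exact mul_comm _ _
  · rfl

-- ===== VERDICT (by name: the statement is the Claim_ definition above) =====
theorem twoPluses_spec : Claim_equal_twoPluses := by
  intro grid _hdom _hpre
  unfold Spec_twoPluses twoPluses twoPluses_alt
  set R : Int := (grid.length : Int) with hR
  set C : Int := ((grid.headD "").toList.length : Int) with hC
  have hgood := pvLi_good grid
  have hperm := PySem.List.sorted_perm (pvLi grid) (fun t => t.2.2) true
  have hpw := PySem.List.sorted_pairwise_rev (pvLi grid) (fun t => t.2.2)
  have hsz : ∀ t ∈ PySem.List.sorted (pvLi grid) (fun t => t.2.2) true, 1 ≤ t.2.2 := by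
    intro t ht
    have := (PySem.List.mem_sorted _ _ _ _).mp ht
    exact (hgood t this).2.2.2.2.1
  rw [pvOuterA_eq _ 0 (le_refl 0) hpw hsz]
  rw [pvPM_perm pvVA pvVA_symm hperm]
  rw [pvPM_map_congr (w := pvVB) (f := pvF C)
    (fun p hp q hq => pvVA_eq_pvVB (hgood p hp) (hgood q hq))]
  rw [← pvPluses_eq_map]
  rw [pvBestB_eq _ 0 (le_refl 0)]
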